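-- pv_equiv track=rewrite | github.com/Arsen1302/Code-copy-detector | TestData/solutions/problem_1481_4.py | solution_1481_4
-- ===== SOURCE A (Python) =====
-- from typing import List
--
-- def solution_1481_4(nums: List[int]) -> List[int]:
--     n=len(nums)
--     res=[0]
--     onecount=0
--     for i in range(n):
--         onecount+=(nums[i]==1)
--     m=onecount
--     for i in range(n):
--         onecount+=(nums[i]==0)-(nums[i]==1)
--         if onecount>=m:
--             if onecount!=m:
--                 m=onecount
--                 res=[]
--             res+=[i+1]
--     return res
-- ===== SOURCE B (Python) =====
-- def solution_1481_4(nums):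
--     # Materialize the full metric table g (g[0] = total ones, then running updates),
--     # take its max, and filter the positions equal to it.
--     g = [sum(x == 1 for x in nums)]
--     for x in nums:
--         g.append(g[-1] + (x == 0) - (x == 1))
--     mx = max(g)
--     return [j for j, v in enumerate(g) if v == mx]
-- ===== Notes on version B (the rewrite author's own statement) =====
-- stated objective: alternative
-- what changed: B materializes the whole balance table g, takes max(g) once, and filters the indices equal to it, replacing A's single pass with an inline running maximum and list resets.
import Mathlib
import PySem

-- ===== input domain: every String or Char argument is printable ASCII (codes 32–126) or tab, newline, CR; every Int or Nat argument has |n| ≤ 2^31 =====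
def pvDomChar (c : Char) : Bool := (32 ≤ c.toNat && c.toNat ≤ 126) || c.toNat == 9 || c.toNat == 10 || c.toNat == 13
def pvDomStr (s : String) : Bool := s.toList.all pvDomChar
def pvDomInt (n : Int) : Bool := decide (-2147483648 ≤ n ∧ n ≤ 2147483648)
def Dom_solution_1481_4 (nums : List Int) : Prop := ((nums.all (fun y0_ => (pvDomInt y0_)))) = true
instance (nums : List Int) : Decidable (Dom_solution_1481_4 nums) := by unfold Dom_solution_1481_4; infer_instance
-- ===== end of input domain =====

-- B builds the full metric table, then max + filter, instead of A's inline running maximum with resets (alternative decomposition, same cost).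
-- ===== PORT A =====
def solution_1481_4 (nums : List Int) : List Int :=
  let n : Int := (nums.length : Int)
  let res : List Int := [0]
  let onecount : Int :=
    (PySem.List.pyRange 0 n 1).foldl
      (fun acc i => acc + (if PySem.List.pyGetD nums i 0 = 1 then 1 else 0)) 0
  let m : Int := onecount
  let st :=
    (PySem.List.pyRange 0 n 1).foldl
      (fun (st : Int × Int × List Int) i =>
        let oc := st.1 + (if PySem.List.pyGetD nums i 0 = 0 then (1:Int) else 0)
                       - (if PySem.List.pyGetD nums i 0 = 1 then (1:Int) else 0)
        if oc ≥ st.2.1 then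
          if oc ≠ st.2.1 then (oc, oc, ([] : List Int) ++ [i + 1])
          else (oc, st.2.1, st.2.2 ++ [i + 1])
        else (oc, st.2.1, st.2.2))
      (onecount, m, res)
  st.2.2

-- ===== PORT B =====
def solution_1481_4_alt (nums : List Int) : List Int :=
  let g0 : Int := (nums.map (fun x => if x = 1 then (1:Int) else 0)).sum
  let g : List Int :=
    nums.foldl
      (fun g x => g ++ [PySem.List.pyGetD g (-1) 0
                        + (if x = 0 then (1:Int) else 0)
                        - (if x = 1 then (1:Int) else 0)]) [g0]
  let mx : Int := (PySem.List.max? g (fun v => v)).getD 0   -- g is nonempty, so max? is never none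
  (PySem.List.enumerate g 0).filterMap (fun p => if p.2 = mx then some p.1 else none)

-- ===== PRECONDITION & SPEC =====
def Spec_solution_1481_4 (nums : List Int) (out : List Int) : Prop := out = solution_1481_4_alt nums
instance (nums : List Int) (out : List Int) : Decidable (Spec_solution_1481_4 nums out) := by unfold Spec_solution_1481_4; infer_instance

-- ===== CLAIM (what is proved, stated in full; the proofs are below) =====
def Claim_equal_solution_1481_4 : Prop := ∀ (nums : List Int), Dom_solution_1481_4 nums → Spec_solution_1481_4 nums (solution_1481_4 nums)

-- ===== LEMMAS AND PROOFS =====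

/-- The per-element update of the running balance. -/
def pvStep (x : Int) : Int :=
  (if x = 0 then (1:Int) else 0) - (if x = 1 then (1:Int) else 0)

/-- The list of running balances after each element, starting from `s` (excluding `s` itself). -/
def pvVals (s : Int) : List Int → List Int
  | [] => []
  | x :: xs => (s + pvStep x) :: pvVals (s + pvStep x) xs

/-- The body of A's second loop, as a named function of the state and an `enumerate` pair. -/
def pvF (st : Int × Int × List Int) (q : Int × Int) : Int × Int × List Int :=
  let oc := st.1 + (if q.2 = 0 then (1:Int) else 0) - (if q.2 = 1 then (1:Int) else 0)
  if oc ≥ st.2.1 then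
    if oc ≠ st.2.1 then (oc, oc, ([] : List Int) ++ [q.1 + 1])
    else (oc, st.2.1, st.2.2 ++ [q.1 + 1])
  else (oc, st.2.1, st.2.2)

theorem pvF_apply (s m : Int) (res : List Int) (p x : Int) :
    pvF (s, m, res) (p, x)
    = if s + pvStep x ≥ m then
        if s + pvStep x ≠ m then (s + pvStep x, s + pvStep x, ([] : List Int) ++ [p + 1])
        else (s + pvStep x, m, res ++ [p + 1])
      else (s + pvStep x, m, res) := by
  have hbody : (s + (if x = 0 then (1:Int) else 0) - (if x = 1 then (1:Int) else 0))
      = s + pvStep x := by simp [pvStep]; ring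
  simp only [pvF, hbody]

/-- B's table-building loop appends exactly the running balances. -/
theorem pvB_table (xs : List Int) : ∀ (acc : List Int) (s : Int),
    xs.foldl
      (fun g x => g ++ [PySem.List.pyGetD g (-1) 0
                        + (if x = 0 then (1:Int) else 0)
                        - (if x = 1 then (1:Int) else 0)]) (acc ++ [s])
    = acc ++ s :: pvVals s xs := by
  induction xs with
  | nil => intro acc s; simp [pvVals]
  | cons x xs ih =>
    intro acc s
    simp only [List.foldl_cons, PySem.List.pyGetD_neg_one_append_singleton, pvVals]
    have h := ih (acc ++ [s]) (s + pvStep x)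
    simpa [pvStep, List.append_assoc, sub_eq_add_neg, add_assoc] using h

/-- Main invariant for A's loop over `enumerate`, stated on the result-list component. -/
theorem pvA_loop (xs : List Int) : ∀ (s m : Int) (res : List Int) (p : Int),
    ((PySem.List.enumerate xs p).foldl pvF (s, m, res)).2.2
    = (if (pvVals s xs).foldl max m = m then res else [])
      ++ (PySem.List.enumerate (pvVals s xs) (p + 1)).filterMap
           (fun q => if q.2 = (pvVals s xs).foldl max m then some q.1 else none) := by
  induction xs with
  | nil => intro s m res p; simp [pvVals, PySem.List.enumerate_nil]
  | cons x xs ih =>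
    intro s m res p
    rw [PySem.List.enumerate_cons, List.foldl_cons, pvF_apply]
    set v := s + pvStep x with hv
    have hvals : pvVals s (x :: xs) = v :: pvVals v xs := by simp [pvVals, hv]
    rw [hvals, PySem.List.enumerate_cons, List.filterMap_cons]
    simp only [List.foldl_cons]
    by_cases h1 : v ≥ m
    · by_cases h2 : v ≠ m
      · -- strict increase: reset
        rw [if_pos h1, if_pos h2, ih v v (([] : List Int) ++ [p + 1]) (p + 1)]
        simp only [max_eq_right (le_of_lt (lt_of_le_of_ne h1 (Ne.symm h2)))]
        have hge : v ≤ (pvVals v xs).foldl max v := (PySem.List.le_foldl_max _ _).1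
        have hne : ¬ ((pvVals v xs).foldl max v = m) := by omega
        rw [if_neg hne]
        by_cases h3 : v = (pvVals v xs).foldl max v
        · rw [if_pos h3.symm]
          simp [if_pos h3]
        · rw [if_neg (fun h => h3 h.symm)]
          simp [if_neg h3]
      · -- v = m: append to res, keep the maximum
        have h2' : v = m := not_ne_iff.mp h2
        rw [if_pos h1, if_neg h2, ih v m (res ++ [p + 1]) (p + 1)]
        simp only [h2', max_self]
        by_cases h3 : (pvVals m xs).foldl max m = m
        · simp [h3]
        · have hne2 : ¬ (m = (pvVals m xs).foldl max m) := fun h => h3 h.symm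
          simp [if_neg h3, if_neg hne2]
    · -- v < m: skip
      rw [if_neg h1, ih v m res (p + 1)]
      have h1' : v < m := lt_of_not_ge h1
      simp only [max_eq_left (le_of_lt h1')]
      have hge : m ≤ (pvVals v xs).foldl max m := (PySem.List.le_foldl_max _ _).1
      have hvne : ¬ (v = (pvVals v xs).foldl max m) := by omega
      simp [if_neg hvne]

/-- A's counting loop equals B's sum of indicators. -/
theorem pvCount (xs : List Int) :
    xs.foldl (fun acc x => acc + (if x = 1 then (1:Int) else 0)) 0
    = (xs.map (fun x => if x = 1 then (1:Int) else 0)).sum := by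
  simpa using PySem.List.foldl_add (l := xs) (g := fun x => if x = 1 then (1:Int) else 0) (a := 0)

-- ===== VERDICT (by name: the statement is the Claim_ definition above) =====
theorem solution_1481_4_spec : Claim_equal_solution_1481_4 := by
  intro nums _
  unfold Spec_solution_1481_4
  set c : Int := nums.foldl (fun acc x => acc + (if x = 1 then (1:Int) else 0)) 0 with hc
  have hA : solution_1481_4 nums
      = ((PySem.List.enumerate nums 0).foldl pvF (c, c, [0])).2.2 := by
    unfold solution_1481_4
    dsimp only
    rw [PySem.List.foldl_pyRange_zero_pyGetD' nums 0
          (fun (acc : Int) x => acc + (if x = 1 then (1:Int) else 0)) 0]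
    rw [PySem.List.enumerate_eq_map_pyRange (xs := nums) (d := 0), List.foldl_map]
    rfl
  have hsum : (nums.map (fun x => if x = 1 then (1:Int) else 0)).sum = c :=
    (pvCount nums).symm
  have hB : solution_1481_4_alt nums
      = ((PySem.List.enumerate (c :: pvVals c nums) 0).filterMap
          (fun p => if p.2 = (pvVals c nums).foldl max c then some p.1 else none)) := by
    unfold solution_1481_4_alt
    dsimp only
    rw [hsum]
    have htab := pvB_table nums [] c
    simp only [List.nil_append] at htab
    rw [htab, PySem.List.max?_id_cons]
    rfl
  rw [hA, pvA_loop nums c c [0] 0, hB, PySem.List.enumerate_cons, List.filterMap_cons]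
  by_cases hM : (pvVals c nums).foldl max c = c
  · simp [hM]
  · have hM' : ¬ (c = (pvVals c nums).foldl max c) := fun h => hM h.symm
    simp [if_neg hM, if_neg hM']
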